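-- pv_equiv track=rewrite | github.com/adipurnamk/python-dts-oa-2020 | p3.py | send_batch
-- ===== SOURCE A (Python) =====
-- import math
--
-- def caesar_encript(txt,shift):
--   pass
--   # Mulai Kode anda di sini
--   result = ''
--   for i in range(len(txt)):
--     char = txt[i]
--
--     if char.isupper():
--       result += chr((ord(char) + shift-65) % 26 + 65)
--     elif char.islower():
--       result += chr((ord(char) + shift-97) % 26 + 97)
--     else:
--       result += char
--
--   return result
--
-- def shuffle_order(txt,order):
--   return ''.join([txt[i] for i in order])
--
-- def send_batch(txt,batch_order,shift=3):
--   pass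
--   # Mulai Kode anda di sini
--
--   # Cek panjang txt, jika kurang ditambah '_'
--   n = len(batch_order)
--
--   if len(txt) % n != 0:
--     ceil = math.ceil(len(txt)/n)
--     diff = abs(len(txt) - ceil*n)
--     txt += '_' * diff
--
--   # Enkripsi caesar
--   txt = caesar_encript(txt,shift)
--
--   # Split txt, hasil berupa list
--   splitted = [txt[i:i+n] for i in range(0, len(txt), n)]
--
--   result = []
--   for i in splitted:
--     shuffled = shuffle_order(i,batch_order)
--     result.append(shuffled)
--
--   return result
-- ===== SOURCE B (Python) =====
-- def send_batch(txt, batch_order, shift=3):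
--     # One fused pass: each output chunk is built directly from its source window of
--     # txt, Caesar-shifting inline and emitting '_' past the end (no intermediate
--     # padded / encrypted / split strings).
--     n = len(batch_order)
--     result = []
--     for c in range((len(txt) + n - 1) // n):  # ZeroDivisionError on empty order, like A
--         chunk = []
--         for i in range(c * n, c * n + n):
--             if i >= len(txt):
--                 chunk.append('_')
--             else:
--                 ch = txt[i]
--                 if 'A' <= ch <= 'Z':
--                     ch = chr((ord(ch) + shift - 65) % 26 + 65)
--                 elif 'a' <= ch <= 'z':
--                     ch = chr((ord(ch) + shift - 97) % 26 + 97)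
--                 chunk.append(ch)
--         result.append(''.join(chunk[o] for o in batch_order))
--     return result
-- ===== Notes on version B (the rewrite author's own statement) =====
-- stated objective: alternative
-- what changed: A pads, Caesar-encrypts the whole text, slices it into chunks and then shuffles each chunk; B is one fused pass that builds each output chunk directly from its source window of the original text, Caesar-shifting inline and emitting '_' past the end, then indexes that one small chunk by batch_order, with no intermediate padded/encrypted/split full-text strings.
import Mathlib
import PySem

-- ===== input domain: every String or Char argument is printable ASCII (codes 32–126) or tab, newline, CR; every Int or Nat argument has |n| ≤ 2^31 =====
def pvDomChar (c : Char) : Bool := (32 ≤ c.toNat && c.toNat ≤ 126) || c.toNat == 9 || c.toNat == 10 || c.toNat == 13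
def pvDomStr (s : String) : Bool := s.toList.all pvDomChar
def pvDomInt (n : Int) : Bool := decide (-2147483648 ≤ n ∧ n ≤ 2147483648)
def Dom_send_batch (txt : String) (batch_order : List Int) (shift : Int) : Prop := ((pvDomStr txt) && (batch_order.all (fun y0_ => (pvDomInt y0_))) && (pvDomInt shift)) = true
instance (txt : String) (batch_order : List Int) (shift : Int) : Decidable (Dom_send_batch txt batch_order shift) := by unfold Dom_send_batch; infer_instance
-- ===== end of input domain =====

-- B fuses A's pad / Caesar-encrypt / split / shuffle stages into one direct pass that
-- computes each output character from its source position in txt (objective: simpler).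

-- ===== PORT A =====
-- caesar_encript: result-accumulating loop over the characters of txt
def caesar_encript (txt : String) (shift : Int) : String :=
  String.ofList (txt.toList.foldl (fun result char =>
    if PySem.Chars.isupper char then
      result ++ [Char.ofNat ((PySem.Int.mod ((char.toNat : Int) + shift - 65) 26 + 65).toNat)]
    else if PySem.Chars.islower char then
      result ++ [Char.ofNat ((PySem.Int.mod ((char.toNat : Int) + shift - 97) 26 + 97).toNat)]
    else result ++ [char]) [])

-- txt[i] may raise IndexError; in range under Pre_send_batch, where pyGetD is exact
def shuffle_order (txt : String) (order : List Int) : String :=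
  String.ofList (order.map (fun i => PySem.List.pyGetD txt.toList i ' '))

def send_batch (txt : String) (batch_order : List Int) (shift : Int) : List String :=
  let n : Int := batch_order.length
  let cs0 := txt.toList
  let cs1 := if PySem.Int.mod (cs0.length : Int) n ≠ 0 then
      -- math.ceil(len(txt)/n): exact as the integer ceiling -((-len) // n) for the list lengths involved
      let ceil := -(PySem.Int.floordiv (-(cs0.length : Int)) n)
      let diff := ((cs0.length : Int) - ceil * n).natAbs
      cs0 ++ List.replicate diff '_'
    else cs0
  let txt1 := caesar_encript (String.ofList cs1) shift
  let splitted := (PySem.List.pyRange 0 (txt1.toList.length : Int) n).map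
      (fun i => String.ofList (PySem.List.slice txt1.toList (some i) (some (i + n))))
  splitted.foldl (fun result i => result ++ [shuffle_order i batch_order]) []

-- ===== PORT B =====
def pvShiftChar (shift : Int) (ch : Char) : Char :=
  if 'A' ≤ ch ∧ ch ≤ 'Z' then Char.ofNat ((PySem.Int.mod ((ch.toNat : Int) + shift - 65) 26 + 65).toNat)
  else if 'a' ≤ ch ∧ ch ≤ 'z' then Char.ofNat ((PySem.Int.mod ((ch.toNat : Int) + shift - 97) 26 + 97).toNat)
  else ch

def send_batch_alt (txt : String) (batch_order : List Int) (shift : Int) : List String :=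
  let n : Int := batch_order.length
  let cs := txt.toList
  (PySem.List.pyRange 0 (PySem.Int.floordiv ((cs.length : Int) + n - 1) n) 1).map (fun c =>
    let chunk := (PySem.List.pyRange (c * n) (c * n + n) 1).map (fun i =>
      if (cs.length : Int) ≤ i then '_'
      else pvShiftChar shift (PySem.List.pyGetD cs i ' '))
    String.ofList (batch_order.map (fun o => PySem.List.pyGetD chunk o ' ')))

-- ===== PRECONDITION & SPEC =====
-- Pre_ excludes exactly the inputs where A raises: an empty batch_order (ZeroDivisionError)
-- and, when txt is nonempty, an order index outside [-n, n) (IndexError in shuffle_order).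
def Pre_send_batch (txt : String) (batch_order : List Int) (shift : Int) : Prop :=
  batch_order ≠ [] ∧ (txt.toList = [] ∨ ∀ o ∈ batch_order,
    -(batch_order.length : Int) ≤ o ∧ o < (batch_order.length : Int))
instance (txt : String) (batch_order : List Int) (shift : Int) : Decidable (Pre_send_batch txt batch_order shift) := by unfold Pre_send_batch; infer_instance

def pvWitness_send_batch : String × List Int × Int := ("Hello, Friend!", [1, 0, 2, -1], 5)

def Spec_send_batch (txt : String) (batch_order : List Int) (shift : Int) (out : List String) : Prop := out = send_batch_alt txt batch_order shift
instance (txt : String) (batch_order : List Int) (shift : Int) (out : List String) : Decidable (Spec_send_batch txt batch_order shift out) := by unfold Spec_send_batch; infer_instance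

-- ===== CLAIM (what is proved, stated in full; the proofs are below) =====
def Claim_equal_send_batch : Prop := ∀ (txt : String) (batch_order : List Int) (shift : Int), Dom_send_batch txt batch_order shift → Pre_send_batch txt batch_order shift → Spec_send_batch txt batch_order shift (send_batch txt batch_order shift)

-- ===== LEMMAS AND PROOFS =====

-- A's character loop is a map of B's per-character shift
theorem pv_caesar_eq_map (shift : Int) (cs : List Char) :
    cs.foldl (fun result char =>
      if PySem.Chars.isupper char then
        result ++ [Char.ofNat ((PySem.Int.mod ((char.toNat : Int) + shift - 65) 26 + 65).toNat)]
      else if PySem.Chars.islower char then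
        result ++ [Char.ofNat ((PySem.Int.mod ((char.toNat : Int) + shift - 97) 26 + 97).toNat)]
      else result ++ [char]) [] = cs.map (pvShiftChar shift) := by
  have hfun : (fun (result : List Char) (char : Char) =>
      if PySem.Chars.isupper char then
        result ++ [Char.ofNat ((PySem.Int.mod ((char.toNat : Int) + shift - 65) 26 + 65).toNat)]
      else if PySem.Chars.islower char then
        result ++ [Char.ofNat ((PySem.Int.mod ((char.toNat : Int) + shift - 97) 26 + 97).toNat)]
      else result ++ [char]) = fun r c => r ++ [pvShiftChar shift c] := by
    funext r c
    simp only [pvShiftChar, PySem.Chars.isupper, PySem.Chars.islower, Bool.and_eq_true,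
      decide_eq_true_eq]
    split_ifs <;> rfl
  rw [hfun, PySem.List.foldl_append_singleton_eq_map]
  simp

-- B's ceiling division (len + n - 1) // n equals the Nat ceiling
theorem pv_floordiv_ceil (L nN : Nat) (h : 0 < nN) :
    PySem.Int.floordiv ((L : Int) + nN - 1) nN = (((L + nN - 1) / nN : Nat) : Int) := by
  have hI : (0 : Int) < nN := by exact_mod_cast h
  rw [PySem.Int.floordiv_eq_iff_of_pos hI]
  have hd := Nat.div_add_mod (L + nN - 1) nN
  have hm := Nat.mod_lt (L + nN - 1) h
  set m := (L + nN - 1) / nN with hmdef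
  set r := (L + nN - 1) % nN with hrdef
  have hc : ((nN * m + r : Nat) : Int) = ((L + nN - 1 : Nat) : Int) := by rw [hd]
  have hsub : ((L + nN - 1 : Nat) : Int) = (L : Int) + nN - 1 := by omega
  push_cast at hc
  rw [hsub] at hc
  have hr : ((r : Nat) : Int) < nN := by exact_mod_cast hm
  have hr0 : (0 : Int) <= (r : Nat) := by positivity
  constructor <;> nlinarith

-- A's math.ceil(len/n) = -((-len) // n) equals the same Nat ceiling
theorem pv_negdiv_ceil (L nN : Nat) (h : 0 < nN) :
    -(PySem.Int.floordiv (-(L : Int)) nN) = (((L + nN - 1) / nN : Nat) : Int) := by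
  have hI : (0 : Int) < nN := by exact_mod_cast h
  rw [PySem.Int.neg_floordiv_neg_eq_iff_of_pos hI]
  have hd := Nat.div_add_mod (L + nN - 1) nN
  have hm := Nat.mod_lt (L + nN - 1) h
  set m := (L + nN - 1) / nN with hmdef
  set r := (L + nN - 1) % nN with hrdef
  have hc : ((nN * m + r : Nat) : Int) = ((L + nN - 1 : Nat) : Int) := by rw [hd]
  have hsub : ((L + nN - 1 : Nat) : Int) = (L : Int) + nN - 1 := by omega
  push_cast at hc
  rw [hsub] at hc
  have hr : ((r : Nat) : Int) < nN := by exact_mod_cast hm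
  have hr0 : (0 : Int) <= (r : Nat) := by positivity
  constructor <;> nlinarith

theorem pv_le_ceil_mul (L nN : Nat) (h : 0 < nN) : L <= ((L + nN - 1) / nN) * nN := by
  have hd := Nat.div_add_mod (L + nN - 1) nN
  have hm := Nat.mod_lt (L + nN - 1) h
  set m := (L + nN - 1) / nN
  set r := (L + nN - 1) % nN
  rw [Nat.mul_comm]
  generalize hk : nN * m = k at hd
  omega

theorem pv_ceil_mul_of_mod_zero (L nN : Nat) (h : 0 < nN) (h0 : L % nN = 0) :
    ((L + nN - 1) / nN) * nN = L := by
  obtain ⟨q, hq⟩ := Nat.dvd_of_mod_eq_zero h0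
  subst hq
  rw [show nN * q + nN - 1 = nN * q + (nN - 1) by omega]
  rw [Nat.mul_add_div h, Nat.div_eq_of_lt (by omega)]
  simp [Nat.mul_comm]

-- ceiling count of A's chunk range
theorem pv_range_count (m nN : Nat) (h : 0 < nN) (hM : 0 < m * nN) :
    ((((m * nN : Nat) : Int) - 0 + nN - 1) / nN).toNat = m := by
  have h1 : (((m * nN : Nat) : Int) - 0 + nN - 1) = ((m * nN + nN - 1 : Nat) : Int) := by omega
  rw [h1, ← Int.natCast_div, Int.toNat_natCast]
  rw [show m * nN + nN - 1 = nN * m + (nN - 1) by rw [Nat.mul_comm m nN]; omega]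
  rw [Nat.mul_add_div h, Nat.div_eq_of_lt (by omega)]
  omega

-- the '_' pad character is untouched by the shift
theorem pv_shift_pad (shift : Int) : pvShiftChar shift '_' = '_' := by
  unfold pvShiftChar
  rw [if_neg (by decide), if_neg (by decide)]

-- output chunk k of A's padded-encrypted text is exactly B's directly computed chunk
theorem pv_chunk_eq (cs : List Char) (shift : Int) (nN m k : Nat)
    (hn : 0 < nN) (hk : k < m) (hLle : cs.length ≤ m * nN) :
    List.take nN (List.drop (k * nN)
      ((cs ++ List.replicate (m * nN - cs.length) '_').map (pvShiftChar shift)))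
    = (PySem.List.pyRange ((k : Int) * (nN : Int)) ((k : Int) * (nN : Int) + (nN : Int)) 1).map
        (fun i => if (cs.length : Int) ≤ i then '_'
          else pvShiftChar shift (PySem.List.pyGetD cs i ' ')) := by
  have hkk : k * nN + nN ≤ m * nN := by
    have h2 := Nat.mul_le_mul_right nN (show k + 1 ≤ m from hk)
    have h3 : (k + 1) * nN = k * nN + nN := by ring
    omega
  have hrange : PySem.List.pyRange ((k : Int) * (nN : Int)) ((k : Int) * (nN : Int) + (nN : Int)) 1
      = (List.range nN).map (fun (j : Nat) => (k : Int) * (nN : Int) + (j : Int)) := by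
    rw [PySem.List.pyRange_one,
      show ((k : Int) * (nN : Int) + (nN : Int) - (k : Int) * (nN : Int)).toNat = nN by omega]
  rw [hrange, List.map_map]
  have hlenL : ((cs ++ List.replicate (m * nN - cs.length) '_').map (pvShiftChar shift)).length
      = m * nN := by
    simp only [List.length_map, List.length_append, List.length_replicate]
    omega
  apply List.ext_getElem
  · simp only [List.length_take, List.length_drop, List.length_map, List.length_range, hlenL]
    omega
  intro j h1 h2
  have hj : j < nN := by
    simp only [List.length_take, List.length_drop, hlenL] at h1
    omega
  rw [List.getElem_take, List.getElem_drop, List.getElem_map, List.getElem_map,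
    List.getElem_range]
  simp only [Function.comp_apply]
  have hcast : (k : Int) * (nN : Int) + (j : Int) = ((k * nN + j : Nat) : Int) := by
    push_cast; ring
  rw [hcast]
  by_cases hsrc : k * nN + j < cs.length
  · rw [List.getElem_append_left hsrc]
    rw [if_neg (by exact_mod_cast by omega)]
    congr 1
    rw [PySem.List.pyGetD_natCast, List.getD_eq_getElem cs ' ' hsrc]
  · rw [List.getElem_append_right (by omega), List.getElem_replicate, pv_shift_pad]
    rw [if_pos (by exact_mod_cast by omega)]

theorem pv_main (txt : String) (order : List Int) (shift : Int) (hne : order ≠ [])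
    (_hbound : txt.toList = [] ∨ ∀ o ∈ order,
      -(order.length : Int) <= o ∧ o < (order.length : Int)) :
    send_batch txt order shift = send_batch_alt txt order shift := by
  have hn : 0 < order.length := List.length_pos_of_ne_nil hne
  have hI : (0 : Int) < (order.length : Int) := by exact_mod_cast hn
  simp only [send_batch, send_batch_alt, caesar_encript, shuffle_order, String.toList_ofList]
  generalize hg : txt.toList = cs at *
  generalize hnN : order.length = nN at hn hI ⊢
  -- step 1: A's padded text is cs ++ '_' * (ceil(L/n)*n - L)
  have hpadeq : (if PySem.Int.mod (cs.length : Int) (nN : Int) ≠ 0 then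
      cs ++ List.replicate (((cs.length : Int) - -(PySem.Int.floordiv (-(cs.length : Int)) (nN : Int)) * (nN : Int)).natAbs) '_'
    else cs) = cs ++ List.replicate ((cs.length + nN - 1) / nN * nN - cs.length) '_' := by
    by_cases h0 : cs.length % nN = 0
    · rw [if_neg]
      · rw [pv_ceil_mul_of_mod_zero cs.length nN hn h0]
        simp
      · rw [PySem.Int.mod_natCast, h0]
        simp
    · rw [if_pos]
      · rw [pv_negdiv_ceil cs.length nN hn]
        congr 2
        have hle := pv_le_ceil_mul cs.length nN hn
        have hcast : (((cs.length + nN - 1) / nN : Nat) : Int) * (nN : Int)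
            = (((cs.length + nN - 1) / nN * nN : Nat) : Int) := by push_cast; ring
        rw [hcast]
        omega
      · rw [PySem.Int.mod_natCast]
        exact fun hcon => h0 (by exact_mod_cast hcon)
  rw [hpadeq, pv_caesar_eq_map shift]
  simp only [List.length_map, List.length_append, List.length_replicate]
  have hlen2 : cs.length + ((cs.length + nN - 1) / nN * nN - cs.length)
      = (cs.length + nN - 1) / nN * nN := by
    have := pv_le_ceil_mul cs.length nN hn
    omega
  rw [hlen2, pv_floordiv_ceil cs.length nN hn]
  have hLle : cs.length ≤ (cs.length + nN - 1) / nN * nN := pv_le_ceil_mul cs.length nN hn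
  have hm0 : (cs.length + nN - 1) / nN ≠ 0 → cs.length ≠ 0 := by
    intro hne0 h
    apply hne0
    rw [h]
    exact Nat.div_eq_of_lt (by omega)
  generalize hm : (cs.length + nN - 1) / nN = m at hLle hm0 ⊢
  rw [PySem.List.pyRange_of_pos 0 ((m * nN : Nat) : Int) hI]
  by_cases hM0 : m * nN = 0
  · have hmz : m = 0 := by
      rcases Nat.mul_eq_zero.mp hM0 with h | h
      · exact h
      · omega
    subst hmz
    simp
  · rw [if_pos (by exact_mod_cast Nat.pos_of_ne_zero hM0)]
    rw [pv_range_count m nN hn (Nat.pos_of_ne_zero hM0)]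
    rw [List.map_map, PySem.List.foldl_append_singleton_eq_map, List.nil_append, List.map_map]
    rw [PySem.List.pyRange_zero_nat m, List.map_map]
    apply List.map_congr_left
    intro k hk
    simp only [Function.comp_apply, String.toList_ofList]
    have hidx : (0 : Int) + (nN : Int) * (k : Int) = ((k * nN : Nat) : Int) := by push_cast; ring
    rw [hidx, PySem.List.slice_natCast_add]
    rw [pv_chunk_eq cs shift nN m k hn (List.mem_range.mp hk) hLle]

-- ===== VERDICT (by name: the statement is the Claim_ definition above) =====
theorem send_batch_spec : Claim_equal_send_batch := by
  intro txt order shift _ hpre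
  exact pv_main txt order shift hpre.1 hpre.2
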